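-- pv_equiv track=rewrite | github.com/nicobit/spec-poc | scripts/verify_spec_changes.py | validate_changed_files
-- ===== SOURCE A (Python) =====
-- GUARDED_PREFIXES = ("frontend/", "backend/", "shared/")
--
-- def validate_changed_files(changed_files: list[str]) -> list[str]:
--     has_guarded_changes = any(path.startswith(GUARDED_PREFIXES) for path in changed_files)
--     if not has_guarded_changes:
--         return []
--
--     has_feature_spec = any(
--         path.startswith("specs/features/") and path.endswith("/feature-spec.md")
--         for path in changed_files
--     )
--     has_test_plan = any(
--         path.startswith("specs/features/") and path.endswith("/test-plan.md")
--         for path in changed_files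
--     )
--     has_validation_report = any(
--         path.startswith("specs/features/") and path.endswith("/validation-report.md")
--         for path in changed_files
--     )
--
--     errors: list[str] = []
--     if not has_feature_spec:
--         errors.append("Code changes detected but no feature-spec.md was updated.")
--     if not has_test_plan:
--         errors.append("Code changes detected but no test-plan.md was updated.")
--     if not has_validation_report:
--         errors.append("Code changes detected but no validation-report.md was updated.")
--     return errors
-- ===== SOURCE B (Python) =====
-- GUARDED_PREFIXES = ("frontend/", "backend/", "shared/")
--
-- def validate_changed_files(changed_files: list[str]) -> list[str]:
--     # One pass over changed_files maintaining four flags instead of four any-scans.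
--     guarded = feature = test = report = False
--     for path in changed_files:
--         if path.startswith(GUARDED_PREFIXES):
--             guarded = True
--         if path.startswith("specs/features/"):
--             if path.endswith("/feature-spec.md"):
--                 feature = True
--             if path.endswith("/test-plan.md"):
--                 test = True
--             if path.endswith("/validation-report.md"):
--                 report = True
--     if not guarded:
--         return []
--     errors: list[str] = []
--     if not feature:
--         errors.append("Code changes detected but no feature-spec.md was updated.")
--     if not test:
--         errors.append("Code changes detected but no test-plan.md was updated.")
--     if not report:
--         errors.append("Code changes detected but no validation-report.md was updated.")
--     return errors
-- ===== Notes on version B (the rewrite author's own statement) =====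
-- stated objective: simpler
-- what changed: Replaces four separate any-scans over the list with a single loop that maintains four booleans, then assembles the same messages from the flags.
import Mathlib
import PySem

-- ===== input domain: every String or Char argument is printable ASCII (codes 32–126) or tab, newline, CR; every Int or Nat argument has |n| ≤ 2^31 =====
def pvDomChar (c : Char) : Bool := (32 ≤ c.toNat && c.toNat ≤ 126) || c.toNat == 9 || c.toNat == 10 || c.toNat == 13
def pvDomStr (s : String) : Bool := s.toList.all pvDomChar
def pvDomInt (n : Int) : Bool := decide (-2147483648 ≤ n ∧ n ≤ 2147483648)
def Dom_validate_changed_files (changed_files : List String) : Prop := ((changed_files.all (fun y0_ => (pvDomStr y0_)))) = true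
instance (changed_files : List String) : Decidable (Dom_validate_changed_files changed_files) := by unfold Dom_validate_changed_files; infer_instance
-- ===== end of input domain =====

-- B replaces A's four separate any-scans with a single pass maintaining four booleans (simpler decomposition, same result).

-- ===== PORT A =====
def validate_changed_files (changed_files : List String) : List String :=
  let has_guarded_changes := changed_files.any (fun path =>
    PySem.Str.startswith path "frontend/" || PySem.Str.startswith path "backend/" || PySem.Str.startswith path "shared/")
  if !has_guarded_changes then []
  else
    let has_feature_spec := changed_files.any (fun path =>
      PySem.Str.startswith path "specs/features/" && PySem.Str.endswith path "/feature-spec.md")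
    let has_test_plan := changed_files.any (fun path =>
      PySem.Str.startswith path "specs/features/" && PySem.Str.endswith path "/test-plan.md")
    let has_validation_report := changed_files.any (fun path =>
      PySem.Str.startswith path "specs/features/" && PySem.Str.endswith path "/validation-report.md")
    (if !has_feature_spec then ["Code changes detected but no feature-spec.md was updated."] else []) ++
    (if !has_test_plan then ["Code changes detected but no test-plan.md was updated."] else []) ++
    (if !has_validation_report then ["Code changes detected but no validation-report.md was updated."] else [])

-- ===== PORT B =====
-- one step of B's single loop over the four flags
def pvAltStep (st : Bool × Bool × Bool × Bool) (path : String) : Bool × Bool × Bool × Bool :=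
  let g := if PySem.Str.startswith path "frontend/" || PySem.Str.startswith path "backend/" || PySem.Str.startswith path "shared/"
           then true else st.1
  if PySem.Str.startswith path "specs/features/" then
    let f := if PySem.Str.endswith path "/feature-spec.md" then true else st.2.1
    let t := if PySem.Str.endswith path "/test-plan.md" then true else st.2.2.1
    let r := if PySem.Str.endswith path "/validation-report.md" then true else st.2.2.2
    (g, f, t, r)
  else (g, st.2.1, st.2.2.1, st.2.2.2)

def validate_changed_files_alt (changed_files : List String) : List String :=
  let st := changed_files.foldl pvAltStep (false, false, false, false)
  if !st.1 then []
  else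
    (if !st.2.1 then ["Code changes detected but no feature-spec.md was updated."] else []) ++
    (if !st.2.2.1 then ["Code changes detected but no test-plan.md was updated."] else []) ++
    (if !st.2.2.2 then ["Code changes detected but no validation-report.md was updated."] else [])

-- ===== PRECONDITION & SPEC =====
def Spec_validate_changed_files (changed_files : List String) (out : List String) : Prop := out = validate_changed_files_alt changed_files
instance (changed_files : List String) (out : List String) : Decidable (Spec_validate_changed_files changed_files out) := by unfold Spec_validate_changed_files; infer_instance

-- ===== CLAIM (what is proved, stated in full; the proofs are below) =====
def Claim_equal_validate_changed_files : Prop := ∀ (changed_files : List String), Dom_validate_changed_files changed_files → Spec_validate_changed_files changed_files (validate_changed_files changed_files)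

-- ===== LEMMAS AND PROOFS =====

-- B's fold computes exactly A's four `any` scans, componentwise.
theorem pvAltStep_foldl (changed_files : List String) (st : Bool × Bool × Bool × Bool) :
    changed_files.foldl pvAltStep st =
      (st.1 || changed_files.any (fun path =>
        PySem.Str.startswith path "frontend/" || PySem.Str.startswith path "backend/" || PySem.Str.startswith path "shared/"),
       st.2.1 || changed_files.any (fun path =>
        PySem.Str.startswith path "specs/features/" && PySem.Str.endswith path "/feature-spec.md"),
       st.2.2.1 || changed_files.any (fun path =>
        PySem.Str.startswith path "specs/features/" && PySem.Str.endswith path "/test-plan.md"),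
       st.2.2.2 || changed_files.any (fun path =>
        PySem.Str.startswith path "specs/features/" && PySem.Str.endswith path "/validation-report.md")) := by
  induction changed_files generalizing st with
  | nil => simp
  | cons p rest ih =>
    obtain ⟨g, f, t, r⟩ := st
    simp only [List.foldl_cons, ih, List.any_cons, pvAltStep]
    generalize PySem.Str.startswith p "frontend/" = b1
    generalize PySem.Str.startswith p "backend/" = b2
    generalize PySem.Str.startswith p "shared/" = b3
    generalize PySem.Str.startswith p "specs/features/" = b4
    generalize PySem.Str.endswith p "/feature-spec.md" = b5
    generalize PySem.Str.endswith p "/test-plan.md" = b6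
    generalize PySem.Str.endswith p "/validation-report.md" = b7
    cases b1 <;> cases b2 <;> cases b3 <;> cases b4 <;> cases b5 <;> cases b6 <;> cases b7 <;>
      cases g <;> cases f <;> cases t <;> cases r <;> rfl

-- ===== VERDICT (by name: the statement is the Claim_ definition above) =====
theorem validate_changed_files_spec : Claim_equal_validate_changed_files := by
  intro changed_files _
  unfold Spec_validate_changed_files validate_changed_files validate_changed_files_alt
  simp only [pvAltStep_foldl, Bool.false_or]
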